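-- pv_equiv track=rewrite | github.com/Qasdfyk/Introduction-to-AI | genetic_algorithm/genetic_algorithm_solver.py | evaluate
-- ===== SOURCE A (Python) =====
-- def evaluate(x):
--     n = int(len(x) ** (0.5))
--     checked = [[False] * n for _ in range(n)]
--     avaliable = [[False] * n for _ in range(n)]
--     to_check = []
--     for i in range(n): # accessible from outside
--         to_check.append((i, 0))
--         to_check.append((i, n - 1))
--         to_check.append((0, i))
--         to_check.append((n - 1, i))
--     while to_check:
--         i, j = to_check.pop()
--         if checked[i][j]:
--             continue
--         checked[i][j] = True
--         if x[i * n + j]: # parking spot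
--             avaliable[i][j] = True
--         else: # road
--             if i > 0:
--                 to_check.append((i - 1, j))
--             if i < n - 1:
--                 to_check.append((i + 1, j))
--             if j > 0:
--                 to_check.append((i, j - 1))
--             if j < n - 1:
--                 to_check.append((i, j + 1))
--     return sum(sum(row) for row in avaliable)
-- ===== SOURCE B (Python) =====
-- def evaluate(x):
--     n = int(len(x) ** (0.5))
--     # pass 1: flood-fill the roads reachable from the boundary (roads only)
--     seeds = [(i, j) for i in range(n) for j in range(n)
--              if (i == 0 or j == 0 or i == n - 1 or j == n - 1) and not x[i * n + j]]
--     reach = [False] * (n * n)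
--     for i, j in seeds:
--         reach[i * n + j] = True
--     stack = list(seeds)
--     while stack:
--         i, j = stack.pop()
--         for a, b in ((i - 1, j), (i + 1, j), (i, j - 1), (i, j + 1)):
--             if 0 <= a < n and 0 <= b < n and not x[a * n + b] and not reach[a * n + b]:
--                 reach[a * n + b] = True
--                 stack.append((a, b))
--     # pass 2: count parking spots on the boundary or next to a reachable road
--     total = 0
--     for i in range(n):
--         for j in range(n):
--             if x[i * n + j]:
--                 if i == 0 or j == 0 or i == n - 1 or j == n - 1:
--                     total += 1
--                 elif (reach[(i - 1) * n + j] or reach[(i + 1) * n + j]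
--                       or reach[i * n + j - 1] or reach[i * n + j + 1]):
--                     total += 1
--     return total
-- ===== Notes on version B (the rewrite author's own statement) =====
-- stated objective: alternative
-- what changed: A interleaves everything in one DFS worklist that seeds every boundary cell and marks parking availability during the flood; B decomposes the task into a roads-only flood fill (seeded only at boundary road cells, marked on push so cells enter the stack at most once) followed by an independent counting sweep that counts a parking cell if it is on the boundary or 4-adjacent to a reached road.
import Mathlib
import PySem

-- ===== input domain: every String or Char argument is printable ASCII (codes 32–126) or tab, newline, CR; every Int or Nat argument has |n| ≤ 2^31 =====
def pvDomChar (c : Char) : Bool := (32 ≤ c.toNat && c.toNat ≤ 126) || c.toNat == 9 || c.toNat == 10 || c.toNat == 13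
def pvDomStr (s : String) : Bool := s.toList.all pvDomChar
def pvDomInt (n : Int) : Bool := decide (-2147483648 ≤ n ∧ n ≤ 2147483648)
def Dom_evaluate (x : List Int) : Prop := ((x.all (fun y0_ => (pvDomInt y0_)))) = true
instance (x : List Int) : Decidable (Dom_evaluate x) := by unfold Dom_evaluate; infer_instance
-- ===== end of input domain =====

-- B replaces A's single DFS that marks parking availability while it floods with two independent
-- passes: a roads-only flood fill seeded at boundary road cells, then a separate counting sweep over
-- all cells; the return values are proved equal on every input (both programs are total).

-- ===== PORT A =====
-- A's worklist holds grid coordinates; the subtype records the bounds 0 ≤ i,j < n that A's code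
-- guarantees for everything it ever pushes (needed for termination; the data is the same (i, j) pair).
def PCell (n : Nat) : Type := {p : Nat × Nat // p.1 < n ∧ p.2 < n}

def pvUnchecked (n : Nat) (C : Finset (Nat × Nat)) : Nat :=
  ((Finset.range n ×ˢ Finset.range n).filter (fun c => c ∉ C)).card

theorem pvUnchecked_insert_lt {n : Nat} {C : Finset (Nat × Nat)} {p : Nat × Nat}
    (h1 : p.1 < n) (h2 : p.2 < n) (hp : p ∉ C) :
    pvUnchecked n (insert p C) < pvUnchecked n C := by
  apply Finset.card_lt_card
  constructor
  · intro q hq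
    simp only [Finset.mem_filter, Finset.mem_insert] at hq ⊢
    exact ⟨hq.1, fun h => hq.2 (Or.inr h)⟩
  · intro hsub
    have := hsub (Finset.mem_filter.mpr ⟨by simp [Finset.mem_product, h1, h2], hp⟩)
    simp at this

def pushesA (n : Nat) (c : PCell n) : List (PCell n) :=
  (if h : c.val.2 + 1 < n then [⟨(c.val.1, c.val.2 + 1), ⟨c.property.1, h⟩⟩] else []) ++
  (if _h : 0 < c.val.2 then [⟨(c.val.1, c.val.2 - 1), ⟨c.property.1, Nat.lt_of_le_of_lt (Nat.sub_le _ _) c.property.2⟩⟩] else []) ++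
  (if h : c.val.1 + 1 < n then [⟨(c.val.1 + 1, c.val.2), ⟨h, c.property.2⟩⟩] else []) ++
  (if _h : 0 < c.val.1 then [⟨(c.val.1 - 1, c.val.2), ⟨Nat.lt_of_le_of_lt (Nat.sub_le _ _) c.property.1, c.property.2⟩⟩] else [])

def loopA (x : List Int) (n : Nat) :
    List (PCell n) → Finset (Nat × Nat) → Finset (Nat × Nat) → Finset (Nat × Nat)
  | [], _, V => V
  | c :: rest, C, V =>
    if hc : c.val ∈ C then loopA x n rest C V
    else if x.getD (c.val.1 * n + c.val.2) 0 ≠ 0 then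
      loopA x n rest (insert c.val C) (insert c.val V)
    else
      loopA x n (pushesA n c ++ rest) (insert c.val C) V
  termination_by S C _ => (pvUnchecked n C, S.length)
  decreasing_by
  · exact Prod.Lex.right _ (by simp)
  · exact Prod.Lex.left _ _ (pvUnchecked_insert_lt c.property.1 c.property.2 hc)
  · exact Prod.Lex.left _ _ (pvUnchecked_insert_lt c.property.1 c.property.2 hc)


def initA (n : Nat) : List (PCell n) :=
  (List.range n).attach.flatMap (fun i =>
    [⟨(i.val, 0), ⟨List.mem_range.mp i.property, Nat.lt_of_le_of_lt (Nat.zero_le _) (List.mem_range.mp i.property)⟩⟩,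
     ⟨(i.val, n - 1), ⟨List.mem_range.mp i.property, Nat.sub_lt (Nat.lt_of_le_of_lt (Nat.zero_le _) (List.mem_range.mp i.property)) Nat.one_pos⟩⟩,
     ⟨(0, i.val), ⟨Nat.lt_of_le_of_lt (Nat.zero_le _) (List.mem_range.mp i.property), List.mem_range.mp i.property⟩⟩,
     ⟨(n - 1, i.val), ⟨Nat.sub_lt (Nat.lt_of_le_of_lt (Nat.zero_le _) (List.mem_range.mp i.property)) Nat.one_pos, List.mem_range.mp i.property⟩⟩])

def evaluate (x : List Int) : Int :=
  let n := Nat.sqrt x.length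
  let V := loopA x n (initA n).reverse ∅ ∅
  (List.range n).foldl (fun s i =>
    s + (List.range n).foldl (fun t j => t + (if (i, j) ∈ V then (1 : Int) else 0)) 0) 0


-- ===== PORT B =====
def nbrsB (n : Nat) (c : PCell n) : List (Option (PCell n)) :=
  [ if _h : 0 < c.val.1 then some ⟨(c.val.1 - 1, c.val.2), ⟨Nat.lt_of_le_of_lt (Nat.sub_le _ _) c.property.1, c.property.2⟩⟩ else none,
    if h : c.val.1 + 1 < n then some ⟨(c.val.1 + 1, c.val.2), ⟨h, c.property.2⟩⟩ else none,
    if _h : 0 < c.val.2 then some ⟨(c.val.1, c.val.2 - 1), ⟨c.property.1, Nat.lt_of_le_of_lt (Nat.sub_le _ _) c.property.2⟩⟩ else none,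
    if h : c.val.2 + 1 < n then some ⟨(c.val.1, c.val.2 + 1), ⟨c.property.1, h⟩⟩ else none ]

def stepB (x : List Int) (n : Nat) (acc : Finset (Nat × Nat) × List (PCell n)) (oc : Option (PCell n)) :
    Finset (Nat × Nat) × List (PCell n) :=
  match oc with
  | none => acc
  | some d => if x.getD (d.val.1 * n + d.val.2) 0 = 0 ∧ d.val ∉ acc.1
              then (insert d.val acc.1, d :: acc.2) else acc

theorem stepB_fst_subset (x : List Int) (n : Nat) (acc : Finset (Nat × Nat) × List (PCell n))
    (oc : Option (PCell n)) : acc.1 ⊆ (stepB x n acc oc).1 := by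
  cases oc with
  | none => exact fun q h => h
  | some d =>
    simp only [stepB]
    split
    · exact fun q h => Finset.mem_insert_of_mem h
    · exact fun q h => h

theorem foldB_fst_subset (x : List Int) (n : Nat) (L : List (Option (PCell n)))
    (acc : Finset (Nat × Nat) × List (PCell n)) :
    acc.1 ⊆ (L.foldl (stepB x n) acc).1 := by
  induction L generalizing acc with
  | nil => exact fun q h => h
  | cons oc L ih =>
    exact fun q h => ih (stepB x n acc oc) (stepB_fst_subset x n acc oc h)

theorem pvUnchecked_anti {n : Nat} {C C' : Finset (Nat × Nat)} (h : C ⊆ C') :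
    pvUnchecked n C' ≤ pvUnchecked n C := by
  apply Finset.card_le_card
  intro q hq
  simp only [Finset.mem_filter] at hq ⊢
  exact ⟨hq.1, fun hm => hq.2 (h hm)⟩

theorem foldB_progress (x : List Int) (n : Nat) (L : List (Option (PCell n)))
    (acc : Finset (Nat × Nat) × List (PCell n)) :
    L.foldl (stepB x n) acc = acc ∨ pvUnchecked n (L.foldl (stepB x n) acc).1 < pvUnchecked n acc.1 := by
  induction L generalizing acc with
  | nil => exact Or.inl rfl
  | cons oc L ih =>
    simp only [List.foldl_cons]
    rcases oc with _ | d
    · simpa [stepB] using ih acc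
    · simp only [stepB]
      split
      · right
        calc pvUnchecked n (L.foldl (stepB x n) (insert d.val acc.1, d :: acc.2)).1
            ≤ pvUnchecked n (insert d.val acc.1) :=
              pvUnchecked_anti (foldB_fst_subset x n L (insert d.val acc.1, d :: acc.2))
          _ < pvUnchecked n acc.1 := by
              rename_i hcond
              exact pvUnchecked_insert_lt d.property.1 d.property.2 hcond.2
      · exact ih acc

def loopB (x : List Int) (n : Nat) : List (PCell n) → Finset (Nat × Nat) → Finset (Nat × Nat)
  | [], R => R
  | c :: rest, R =>
    loopB x n ((nbrsB n c).foldl (stepB x n) (R, rest)).2 ((nbrsB n c).foldl (stepB x n) (R, rest)).1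
  termination_by S R => (pvUnchecked n R, S.length)
  decreasing_by
    rcases foldB_progress x n (nbrsB n c) (R, rest) with h | h
    · rw [h]
      exact Prod.Lex.right _ (by simp)
    · exact Prod.Lex.left _ _ h
def seedsB (x : List Int) (n : Nat) : List (PCell n) :=
  (List.range n).attach.flatMap (fun i =>
    (List.range n).attach.filterMap (fun j =>
      if (i.val = 0 ∨ j.val = 0 ∨ i.val = n - 1 ∨ j.val = n - 1) ∧ x.getD (i.val * n + j.val) 0 = 0
      then some ⟨(i.val, j.val), ⟨List.mem_range.mp i.property, List.mem_range.mp j.property⟩⟩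
      else none))

def evaluate_alt (x : List Int) : Int :=
  let n := Nat.sqrt x.length
  let R := loopB x n (seedsB x n).reverse
    ((seedsB x n).foldl (fun R c => insert c.val R) ∅)
  (List.range n).foldl (fun s i =>
    (List.range n).foldl (fun t j =>
      if x.getD (i * n + j) 0 ≠ 0 then
        if i = 0 ∨ j = 0 ∨ i = n - 1 ∨ j = n - 1 then t + 1
        else if (i - 1, j) ∈ R ∨ (i + 1, j) ∈ R ∨ (i, j - 1) ∈ R ∨ (i, j + 1) ∈ R then t + 1
        else t
      else t) s) 0

-- ===== PRECONDITION & SPEC =====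
-- A is total (n = isqrt(len x), so every index i*n+j it reads is < len x); no Pre_ needed.
def Spec_evaluate (x : List Int) (out : Int) : Prop := out = evaluate_alt x
instance (x : List Int) (out : Int) : Decidable (Spec_evaluate x out) := by unfold Spec_evaluate; infer_instance

-- ===== CLAIM (what is proved, stated in full; the proofs are below) =====
def Claim_equal_evaluate : Prop := ∀ (x : List Int), Dom_evaluate x → Spec_evaluate x (evaluate x)

-- ===== LEMMAS AND PROOFS =====
-- Both floods compute the same set: the cells reachable from the boundary through road cells
-- (x[i*n+j] == 0), captured by the inductive predicate Vis below. loopA_mem / loopB_mem prove each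
-- worklist loop computes exactly {p | in grid, park/road as marked, Vis p}; cell_eq then matches the
-- two counting passes cell by cell.
def Bdy (n : Nat) (p : Nat × Nat) : Prop := p.1 = 0 ∨ p.2 = 0 ∨ p.1 = n - 1 ∨ p.2 = n - 1

def Adj (p q : Nat × Nat) : Prop :=
  (q.1 = p.1 + 1 ∧ q.2 = p.2) ∨ (q.1 + 1 = p.1 ∧ q.2 = p.2) ∨
  (q.1 = p.1 ∧ q.2 = p.2 + 1) ∨ (q.1 = p.1 ∧ q.2 + 1 = p.2)

inductive Vis (x : List Int) (n : Nat) : Nat × Nat → Prop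
  | boundary (p : Nat × Nat) (h1 : p.1 < n) (h2 : p.2 < n) (hb : Bdy n p) : Vis x n p
  | step (p q : Nat × Nat) (hv : Vis x n p) (hr : x.getD (p.1 * n + p.2) 0 = 0)
      (h1 : q.1 < n) (h2 : q.2 < n) (ha : Adj p q) : Vis x n q

theorem pushesA_mem {n : Nat} {c : PCell n} {d : PCell n} (h : d ∈ pushesA n c) :
    Adj c.val d.val := by
  simp only [pushesA, List.mem_append] at h
  rcases h with ((h | h) | h) | h <;>
    [skip; skip; skip; skip] <;>
    · split at h <;> simp_all [Adj] <;> omega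

theorem pushesA_covers {n : Nat} {c : PCell n} {q : Nat × Nat}
    (h1 : q.1 < n) (h2 : q.2 < n) (ha : Adj c.val q) : ∃ d ∈ pushesA n c, d.val = q := by
  rcases ha with ⟨e1, e2⟩ | ⟨e1, e2⟩ | ⟨e1, e2⟩ | ⟨e1, e2⟩
  · refine ⟨⟨(c.val.1 + 1, c.val.2), ⟨by omega, c.property.2⟩⟩, ?_, by simp [Prod.ext_iff]; omega⟩
    simp only [pushesA, List.mem_append]
    refine Or.inl (Or.inr ?_)
    rw [dif_pos (by omega : c.val.1 + 1 < n)]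
    simp
  · refine ⟨⟨(c.val.1 - 1, c.val.2), ⟨Nat.lt_of_le_of_lt (Nat.sub_le _ _) c.property.1, c.property.2⟩⟩, ?_, by simp [Prod.ext_iff]; omega⟩
    simp only [pushesA, List.mem_append]
    refine Or.inr ?_
    rw [dif_pos (by omega : 0 < c.val.1)]
    simp
  · refine ⟨⟨(c.val.1, c.val.2 + 1), ⟨c.property.1, by omega⟩⟩, ?_, by simp [Prod.ext_iff]; omega⟩
    simp only [pushesA, List.mem_append]
    refine Or.inl (Or.inl (Or.inl ?_))
    rw [dif_pos (by omega : c.val.2 + 1 < n)]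
    simp
  · refine ⟨⟨(c.val.1, c.val.2 - 1), ⟨c.property.1, Nat.lt_of_le_of_lt (Nat.sub_le _ _) c.property.2⟩⟩, ?_, by simp [Prod.ext_iff]; omega⟩
    simp only [pushesA, List.mem_append]
    refine Or.inl (Or.inl (Or.inr ?_))
    rw [dif_pos (by omega : 0 < c.val.2)]
    simp

theorem Vis_lt {x : List Int} {n : Nat} {p : Nat × Nat} (h : Vis x n p) : p.1 < n ∧ p.2 < n := by
  cases h with
  | boundary p h1 h2 _ => exact ⟨h1, h2⟩
  | step p q _ _ h1 h2 _ => exact ⟨h1, h2⟩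

theorem loopA_mem (x : List Int) (n : Nat) (S : List (PCell n)) (C V : Finset (Nat × Nat)) :
    (∀ p, p ∈ V ↔ p ∈ C ∧ x.getD (p.1 * n + p.2) 0 ≠ 0) →
    (∀ p ∈ C, p.1 < n ∧ p.2 < n) →
    (∀ p ∈ C, Vis x n p) →
    (∀ c ∈ S, Vis x n c.val) →
    (∀ p : Nat × Nat, p.1 < n → p.2 < n → Bdy n p → p ∈ C ∨ ∃ c ∈ S, c.val = p) →
    (∀ p ∈ C, x.getD (p.1 * n + p.2) 0 = 0 →
      ∀ q : Nat × Nat, q.1 < n → q.2 < n → Adj p q → q ∈ C ∨ ∃ c ∈ S, c.val = q) →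
    ∀ p, p ∈ loopA x n S C V ↔ (p.1 < n ∧ p.2 < n ∧ x.getD (p.1 * n + p.2) 0 ≠ 0 ∧ Vis x n p) := by
  fun_induction loopA x n S C V with
  | case1 C V =>
    intro hV hCg hCv _ hBd hCl p
    have key : ∀ q : Nat × Nat, Vis x n q → q ∈ C := by
      intro q hq
      induction hq with
      | boundary q h1 h2 hb =>
        rcases hBd q h1 h2 hb with h | ⟨c, hc, _⟩
        · exact h
        · exact absurd hc (List.not_mem_nil)
      | step q r hv hr h1 h2 ha ihq =>
        rcases hCl q ihq hr r h1 h2 ha with h | ⟨c, hc, _⟩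
        · exact h
        · exact absurd hc (List.not_mem_nil)
    constructor
    · intro h
      have h' := (hV p).mp h
      exact ⟨(hCg p h'.1).1, (hCg p h'.1).2, h'.2, hCv p h'.1⟩
    · rintro ⟨h1, h2, h3, h4⟩
      exact (hV p).mpr ⟨key p h4, h3⟩
  | case2 c rest C V hc ih =>
    intro hV hCg hCv hSv hBd hCl p
    refine ih hV hCg hCv (fun d hd => hSv d (List.mem_cons_of_mem _ hd)) ?_ ?_ p
    · intro q h1 h2 hb
      rcases hBd q h1 h2 hb with h | ⟨d, hd, he⟩
      · exact Or.inl h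
      · rcases List.mem_cons.mp hd with rfl | hd
        · exact Or.inl (he ▸ hc)
        · exact Or.inr ⟨d, hd, he⟩
    · intro q hq hr r h1 h2 ha
      rcases hCl q hq hr r h1 h2 ha with h | ⟨d, hd, he⟩
      · exact Or.inl h
      · rcases List.mem_cons.mp hd with rfl | hd
        · exact Or.inl (he ▸ hc)
        · exact Or.inr ⟨d, hd, he⟩
  | case3 c rest C V hc hpark ih =>
    intro hV hCg hCv hSv hBd hCl p
    have hcv : Vis x n c.val := hSv c List.mem_cons_self
    refine ih ?_ ?_ ?_ (fun d hd => hSv d (List.mem_cons_of_mem _ hd)) ?_ ?_ p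
    · intro q
      simp only [Finset.mem_insert]
      rw [hV q]
      constructor
      · rintro (rfl | ⟨h1, h2⟩)
        · exact ⟨Or.inl rfl, hpark⟩
        · exact ⟨Or.inr h1, h2⟩
      · rintro ⟨rfl | h1, h2⟩
        · exact Or.inl rfl
        · exact Or.inr ⟨h1, h2⟩
    · intro q hq
      rcases Finset.mem_insert.mp hq with rfl | hq
      · exact c.property
      · exact hCg q hq
    · intro q hq
      rcases Finset.mem_insert.mp hq with rfl | hq
      · exact hcv
      · exact hCv q hq
    · intro q h1 h2 hb
      rcases hBd q h1 h2 hb with h | ⟨d, hd, he⟩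
      · exact Or.inl (Finset.mem_insert_of_mem h)
      · rcases List.mem_cons.mp hd with rfl | hd
        · exact Or.inl (he ▸ Finset.mem_insert_self _ _)
        · exact Or.inr ⟨d, hd, he⟩
    · intro q hq hr r h1 h2 ha
      rcases Finset.mem_insert.mp hq with rfl | hq
      · exact absurd hr hpark
      · rcases hCl q hq hr r h1 h2 ha with h | ⟨d, hd, he⟩
        · exact Or.inl (Finset.mem_insert_of_mem h)
        · rcases List.mem_cons.mp hd with rfl | hd
          · exact Or.inl (he ▸ Finset.mem_insert_self _ _)
          · exact Or.inr ⟨d, hd, he⟩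
  | case4 c rest C V hc hroad ih =>
    intro hV hCg hCv hSv hBd hCl p
    have hcv : Vis x n c.val := hSv c List.mem_cons_self
    have hroad' : x.getD (c.val.1 * n + c.val.2) 0 = 0 := by
      by_contra h
      exact hroad h
    refine ih ?_ ?_ ?_ ?_ ?_ ?_ p
    · intro q
      rw [hV q]
      simp only [Finset.mem_insert]
      constructor
      · rintro ⟨h1, h2⟩
        exact ⟨Or.inr h1, h2⟩
      · rintro ⟨rfl | h1, h2⟩
        · exact absurd hroad' h2
        · exact ⟨h1, h2⟩
    · intro q hq
      rcases Finset.mem_insert.mp hq with rfl | hq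
      · exact c.property
      · exact hCg q hq
    · intro q hq
      rcases Finset.mem_insert.mp hq with rfl | hq
      · exact hcv
      · exact hCv q hq
    · intro d hd
      rcases List.mem_append.mp hd with hd | hd
      · exact Vis.step c.val d.val hcv hroad' d.property.1 d.property.2 (pushesA_mem hd)
      · exact hSv d (List.mem_cons_of_mem _ hd)
    · intro q h1 h2 hb
      rcases hBd q h1 h2 hb with h | ⟨d, hd, he⟩
      · exact Or.inl (Finset.mem_insert_of_mem h)
      · rcases List.mem_cons.mp hd with rfl | hd
        · exact Or.inl (he ▸ Finset.mem_insert_self _ _)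
        · exact Or.inr ⟨d, List.mem_append_right _ hd, he⟩
    · intro q hq hr r h1 h2 ha
      rcases Finset.mem_insert.mp hq with rfl | hq
      · obtain ⟨d, hd, he⟩ := pushesA_covers h1 h2 ha
        exact Or.inr ⟨d, List.mem_append_left _ hd, he⟩
      · rcases hCl q hq hr r h1 h2 ha with h | ⟨d, hd, he⟩
        · exact Or.inl (Finset.mem_insert_of_mem h)
        · rcases List.mem_cons.mp hd with rfl | hd
          · exact Or.inl (he ▸ Finset.mem_insert_self _ _)
          · exact Or.inr ⟨d, List.mem_append_right _ hd, he⟩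

theorem nbrsB_mem {n : Nat} {c d : PCell n} (h : some d ∈ nbrsB n c) : Adj c.val d.val := by
  simp only [nbrsB, List.mem_cons, List.not_mem_nil, or_false] at h
  rcases h with h | h | h | h <;>
  · split at h <;> simp_all [Adj] <;> omega

theorem nbrsB_covers {n : Nat} {c : PCell n} {q : Nat × Nat}
    (h1 : q.1 < n) (h2 : q.2 < n) (ha : Adj c.val q) :
    ∃ d : PCell n, some d ∈ nbrsB n c ∧ d.val = q := by
  refine ⟨⟨q, h1, h2⟩, ?_, rfl⟩
  simp only [nbrsB, List.mem_cons, List.not_mem_nil, or_false]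
  rcases ha with ⟨e1, e2⟩ | ⟨e1, e2⟩ | ⟨e1, e2⟩ | ⟨e1, e2⟩
  · refine Or.inr (Or.inl ?_)
    rw [dif_pos (by omega : c.val.1 + 1 < n)]
    exact congrArg some (Subtype.ext (Prod.ext_iff.mpr ⟨show q.1 = c.val.1 + 1 by omega, show q.2 = c.val.2 by omega⟩))
  · refine Or.inl ?_
    rw [dif_pos (by omega : 0 < c.val.1)]
    exact congrArg some (Subtype.ext (Prod.ext_iff.mpr ⟨show q.1 = c.val.1 - 1 by omega, show q.2 = c.val.2 by omega⟩))
  · refine Or.inr (Or.inr (Or.inr ?_))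
    rw [dif_pos (by omega : c.val.2 + 1 < n)]
    exact congrArg some (Subtype.ext (Prod.ext_iff.mpr ⟨show q.1 = c.val.1 by omega, show q.2 = c.val.2 + 1 by omega⟩))
  · refine Or.inr (Or.inr (Or.inl ?_))
    rw [dif_pos (by omega : 0 < c.val.2)]
    exact congrArg some (Subtype.ext (Prod.ext_iff.mpr ⟨show q.1 = c.val.1 by omega, show q.2 = c.val.2 - 1 by omega⟩))

theorem stepB_snd_subset (x : List Int) (n : Nat) (acc : Finset (Nat × Nat) × List (PCell n))
    (oc : Option (PCell n)) : acc.2 ⊆ (stepB x n acc oc).2 := by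
  cases oc with
  | none => exact fun d h => h
  | some d =>
    simp only [stepB]
    split
    · exact fun e h => List.mem_cons_of_mem _ h
    · exact fun e h => h

theorem foldB_snd_subset (x : List Int) (n : Nat) (L : List (Option (PCell n)))
    (acc : Finset (Nat × Nat) × List (PCell n)) :
    acc.2 ⊆ (L.foldl (stepB x n) acc).2 := by
  induction L generalizing acc with
  | nil => exact fun d h => h
  | cons oc L ih => exact fun d h => ih (stepB x n acc oc) (stepB_snd_subset x n acc oc h)

theorem stepB_fst_new (x : List Int) (n : Nat) (acc : Finset (Nat × Nat) × List (PCell n))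
    (oc : Option (PCell n)) {p : Nat × Nat} (h : p ∈ (stepB x n acc oc).1) :
    p ∈ acc.1 ∨ ∃ d : PCell n, oc = some d ∧ d.val = p ∧
      x.getD (p.1 * n + p.2) 0 = 0 ∧ d ∈ (stepB x n acc oc).2 := by
  cases oc with
  | none => exact Or.inl h
  | some d =>
    simp only [stepB] at h ⊢
    split at h
    · rcases Finset.mem_insert.mp h with rfl | h
      · rename_i hcond
        refine Or.inr ⟨d, rfl, rfl, hcond.1, ?_⟩
        rw [if_pos hcond]
        exact List.mem_cons_self
      · exact Or.inl h
    · exact Or.inl h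

theorem foldB_fst_new (x : List Int) (n : Nat) (L : List (Option (PCell n)))
    (acc : Finset (Nat × Nat) × List (PCell n)) :
    ∀ p ∈ (L.foldl (stepB x n) acc).1, p ∈ acc.1 ∨ ∃ d : PCell n, some d ∈ L ∧ d.val = p ∧
      x.getD (p.1 * n + p.2) 0 = 0 ∧ d ∈ (L.foldl (stepB x n) acc).2 := by
  induction L generalizing acc with
  | nil => exact fun p h => Or.inl h
  | cons oc L ih =>
    intro p h
    simp only [List.foldl_cons] at h ⊢
    rcases ih (stepB x n acc oc) p h with h' | ⟨d, hd, he, hr, hs⟩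
    · rcases stepB_fst_new x n acc oc h' with h'' | ⟨d, hoc, he, hr, hs⟩
      · exact Or.inl h''
      · exact Or.inr ⟨d, by simp [hoc], he, hr, foldB_snd_subset x n L _ hs⟩
    · exact Or.inr ⟨d, List.mem_cons_of_mem _ hd, he, hr, hs⟩

theorem stepB_snd_new (x : List Int) (n : Nat) (acc : Finset (Nat × Nat) × List (PCell n))
    (oc : Option (PCell n)) {d : PCell n} (h : d ∈ (stepB x n acc oc).2) :
    d ∈ acc.2 ∨ d.val ∈ (stepB x n acc oc).1 := by
  cases oc with
  | none => exact Or.inl h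
  | some e =>
    simp only [stepB] at h ⊢
    split at h
    · rcases List.mem_cons.mp h with rfl | h
      · rename_i hcond
        rw [if_pos hcond]
        exact Or.inr (Finset.mem_insert_self _ _)
      · exact Or.inl h
    · exact Or.inl h

theorem foldB_snd_new (x : List Int) (n : Nat) (L : List (Option (PCell n)))
    (acc : Finset (Nat × Nat) × List (PCell n)) :
    ∀ d ∈ (L.foldl (stepB x n) acc).2, d ∈ acc.2 ∨ d.val ∈ (L.foldl (stepB x n) acc).1 := by
  induction L generalizing acc with
  | nil => exact fun d h => Or.inl h
  | cons oc L ih =>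
    intro d h
    simp only [List.foldl_cons] at h ⊢
    rcases ih (stepB x n acc oc) d h with h' | h'
    · rcases stepB_snd_new x n acc oc h' with h'' | h''
      · exact Or.inl h''
      · exact Or.inr (foldB_fst_subset x n L _ h'')
    · exact Or.inr h'

theorem stepB_covers (x : List Int) (n : Nat) (acc : Finset (Nat × Nat) × List (PCell n))
    {d : PCell n} (hr : x.getD (d.val.1 * n + d.val.2) 0 = 0) :
    d.val ∈ (stepB x n acc (some d)).1 := by
  simp only [stepB]
  split
  · exact Finset.mem_insert_self _ _
  · rename_i hcond
    rw [Classical.not_and_iff_not_or_not] at hcond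
    rcases hcond with h | h
    · exact absurd hr h
    · simpa using h

theorem foldB_covers (x : List Int) (n : Nat) (L : List (Option (PCell n)))
    (acc : Finset (Nat × Nat) × List (PCell n)) {d : PCell n}
    (hd : some d ∈ L) (hr : x.getD (d.val.1 * n + d.val.2) 0 = 0) :
    d.val ∈ (L.foldl (stepB x n) acc).1 := by
  induction L generalizing acc with
  | nil => exact absurd hd List.not_mem_nil
  | cons oc L ih =>
    simp only [List.foldl_cons]
    rcases List.mem_cons.mp hd with rfl | hd
    · exact foldB_fst_subset x n L _ (stepB_covers x n acc hr)
    · exact ih _ hd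

theorem loopB_mem (x : List Int) (n : Nat) (S : List (PCell n)) (R : Finset (Nat × Nat)) :
    (∀ p ∈ R, (p.1 < n ∧ p.2 < n) ∧ x.getD (p.1 * n + p.2) 0 = 0 ∧ Vis x n p) →
    (∀ c ∈ S, c.val ∈ R) →
    (∀ p : Nat × Nat, p.1 < n → p.2 < n → Bdy n p → x.getD (p.1 * n + p.2) 0 = 0 → p ∈ R) →
    (∀ p ∈ R, (∃ c ∈ S, c.val = p) ∨
      (∀ q : Nat × Nat, q.1 < n → q.2 < n → Adj p q → x.getD (q.1 * n + q.2) 0 = 0 → q ∈ R)) →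
    ∀ p, p ∈ loopB x n S R ↔
      (p.1 < n ∧ p.2 < n ∧ x.getD (p.1 * n + p.2) 0 = 0 ∧ Vis x n p) := by
  fun_induction loopB x n S R with
  | case1 R =>
    intro hRg _ hBd hCl p
    have key : ∀ q : Nat × Nat, Vis x n q → x.getD (q.1 * n + q.2) 0 = 0 → q ∈ R := by
      intro q hq
      induction hq with
      | boundary q h1 h2 hb => exact fun hr => hBd q h1 h2 hb hr
      | step q r hv hr h1 h2 ha ihq =>
        intro hrr
        rcases hCl q (ihq hr) with ⟨c, hc, _⟩ | hcl
        · exact absurd hc List.not_mem_nil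
        · exact hcl r h1 h2 ha hrr
    constructor
    · intro h
      obtain ⟨hg, hr, hv⟩ := hRg p h
      exact ⟨hg.1, hg.2, hr, hv⟩
    · rintro ⟨h1, h2, h3, h4⟩
      exact key p h4 h3
  | case2 c rest R ih =>
    intro hRg hSR hBd hCl p
    have hcR : c.val ∈ R := hSR c List.mem_cons_self
    obtain ⟨_, hcroad, hcvis⟩ := hRg c.val hcR
    refine ih ?_ ?_ ?_ ?_ p
    · intro q hq
      rcases foldB_fst_new x n (nbrsB n c) (R, rest) q hq with h | ⟨d, hd, he, hr, _⟩
      · exact hRg q h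
      · subst he
        exact ⟨d.property, hr,
          Vis.step c.val d.val hcvis hcroad d.property.1 d.property.2 (nbrsB_mem hd)⟩
    · intro d hd
      rcases foldB_snd_new x n (nbrsB n c) (R, rest) d hd with h | h
      · exact foldB_fst_subset x n (nbrsB n c) (R, rest)
          (hSR d (List.mem_cons_of_mem _ h))
      · exact h
    · intro q h1 h2 hb hr
      exact foldB_fst_subset x n (nbrsB n c) (R, rest) (hBd q h1 h2 hb hr)
    · intro q hq
      rcases foldB_fst_new x n (nbrsB n c) (R, rest) q hq with h | ⟨d, _, he, _, hs⟩
      · rcases hCl q h with ⟨e, he', hev⟩ | hcl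
        · rcases List.mem_cons.mp he' with rfl | he'
          · refine Or.inr ?_
            intro r h1 h2 ha hr
            obtain ⟨d, hd, hdv⟩ := nbrsB_covers h1 h2 (hev ▸ ha)
            exact hdv ▸ foldB_covers x n (nbrsB n e) (R, rest) hd (by rw [hdv]; exact hr)
          · exact Or.inl ⟨e, foldB_snd_subset x n (nbrsB n c) (R, rest) he', hev⟩
        · refine Or.inr ?_
          intro r h1 h2 ha hr
          exact foldB_fst_subset x n (nbrsB n c) (R, rest) (hcl r h1 h2 ha hr)
      · exact Or.inl ⟨d, hs, he⟩

theorem initA_bdy {n : Nat} {c : PCell n} (h : c ∈ initA n) : Bdy n c.val := by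
  simp only [initA, List.mem_flatMap, List.mem_cons, List.not_mem_nil, or_false] at h
  obtain ⟨i, _, h⟩ := h
  rcases h with rfl | rfl | rfl | rfl
  · exact Or.inr (Or.inl rfl)
  · exact Or.inr (Or.inr (Or.inr rfl))
  · exact Or.inl rfl
  · exact Or.inr (Or.inr (Or.inl rfl))

theorem initA_covers {n : Nat} {p : Nat × Nat} (h1 : p.1 < n) (h2 : p.2 < n) (hb : Bdy n p) :
    ∃ c ∈ initA n, c.val = p := by
  rcases hb with hb | hb | hb | hb
  · refine ⟨⟨(0, p.2), ⟨Nat.lt_of_le_of_lt (Nat.zero_le _) h2, h2⟩⟩,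
      List.mem_flatMap.mpr ⟨⟨p.2, List.mem_range.mpr h2⟩, List.mem_attach _ _, ?_⟩,
      Prod.ext_iff.mpr ⟨hb.symm, rfl⟩⟩
    simp
  · refine ⟨⟨(p.1, 0), ⟨h1, Nat.lt_of_le_of_lt (Nat.zero_le _) h1⟩⟩,
      List.mem_flatMap.mpr ⟨⟨p.1, List.mem_range.mpr h1⟩, List.mem_attach _ _, ?_⟩,
      Prod.ext_iff.mpr ⟨rfl, hb.symm⟩⟩
    simp
  · refine ⟨⟨(n - 1, p.2), ⟨Nat.sub_lt (Nat.lt_of_le_of_lt (Nat.zero_le _) h2) Nat.one_pos, h2⟩⟩,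
      List.mem_flatMap.mpr ⟨⟨p.2, List.mem_range.mpr h2⟩, List.mem_attach _ _, ?_⟩,
      Prod.ext_iff.mpr ⟨hb.symm, rfl⟩⟩
    simp
  · refine ⟨⟨(p.1, n - 1), ⟨h1, Nat.sub_lt (Nat.lt_of_le_of_lt (Nat.zero_le _) h1) Nat.one_pos⟩⟩,
      List.mem_flatMap.mpr ⟨⟨p.1, List.mem_range.mpr h1⟩, List.mem_attach _ _, ?_⟩,
      Prod.ext_iff.mpr ⟨rfl, hb.symm⟩⟩
    simp

theorem evalA_char (x : List Int) (n : Nat) :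
    ∀ p : Nat × Nat, p ∈ loopA x n (initA n).reverse ∅ ∅ ↔
      (p.1 < n ∧ p.2 < n ∧ x.getD (p.1 * n + p.2) 0 ≠ 0 ∧ Vis x n p) := by
  apply loopA_mem
  · intro p
    simp
  · intro p hp
    exact absurd hp (Finset.notMem_empty p)
  · intro p hp
    exact absurd hp (Finset.notMem_empty p)
  · intro c hc
    exact Vis.boundary c.val c.property.1 c.property.2 (initA_bdy (List.mem_reverse.mp hc))
  · intro p h1 h2 hb
    obtain ⟨c, hc, he⟩ := initA_covers h1 h2 hb
    exact Or.inr ⟨c, List.mem_reverse.mpr hc, he⟩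
  · intro p hp
    exact absurd hp (Finset.notMem_empty p)

theorem seedsB_bdy {x : List Int} {n : Nat} {c : PCell n} (h : c ∈ seedsB x n) :
    Bdy n c.val ∧ x.getD (c.val.1 * n + c.val.2) 0 = 0 := by
  simp only [seedsB, List.mem_flatMap, List.mem_filterMap] at h
  obtain ⟨i, _, j, _, h⟩ := h
  split at h
  · rename_i hcond
    cases h
    exact ⟨hcond.1, hcond.2⟩
  · simp at h

theorem seedsB_covers {x : List Int} {n : Nat} {p : Nat × Nat} (h1 : p.1 < n) (h2 : p.2 < n)
    (hb : Bdy n p) (hr : x.getD (p.1 * n + p.2) 0 = 0) : ∃ c ∈ seedsB x n, c.val = p := by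
  refine ⟨⟨p, h1, h2⟩, ?_, rfl⟩
  simp only [seedsB, List.mem_flatMap, List.mem_filterMap]
  refine ⟨⟨p.1, List.mem_range.mpr h1⟩, List.mem_attach _ _,
    ⟨p.2, List.mem_range.mpr h2⟩, List.mem_attach _ _, ?_⟩
  rw [if_pos ⟨hb, hr⟩]

theorem foldInsert_mem {n : Nat} (L : List (PCell n)) (R : Finset (Nat × Nat)) (p : Nat × Nat) :
    p ∈ L.foldl (fun R c => insert c.val R) R ↔ p ∈ R ∨ ∃ c ∈ L, c.val = p := by
  induction L generalizing R with
  | nil => simp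
  | cons c L ih =>
    simp only [List.foldl_cons, ih, Finset.mem_insert, List.mem_cons]
    constructor
    · rintro ((rfl | h) | ⟨d, hd, he⟩)
      · exact Or.inr ⟨c, Or.inl rfl, rfl⟩
      · exact Or.inl h
      · exact Or.inr ⟨d, Or.inr hd, he⟩
    · rintro (h | ⟨d, rfl | hd, he⟩)
      · exact Or.inl (Or.inr h)
      · exact Or.inl (Or.inl he.symm)
      · exact Or.inr ⟨d, hd, he⟩

theorem evalB_char (x : List Int) (n : Nat) :
    ∀ p : Nat × Nat,
      p ∈ loopB x n (seedsB x n).reverse ((seedsB x n).foldl (fun R c => insert c.val R) ∅) ↔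
      (p.1 < n ∧ p.2 < n ∧ x.getD (p.1 * n + p.2) 0 = 0 ∧ Vis x n p) := by
  apply loopB_mem
  · intro p hp
    rcases (foldInsert_mem _ _ p).mp hp with h | ⟨c, hc, he⟩
    · exact absurd h (Finset.notMem_empty p)
    · obtain ⟨hb, hr⟩ := seedsB_bdy hc
      subst he
      exact ⟨c.property, hr, Vis.boundary c.val c.property.1 c.property.2 hb⟩
  · intro c hc
    exact (foldInsert_mem _ _ c.val).mpr (Or.inr ⟨c, List.mem_reverse.mp hc, rfl⟩)
  · intro p h1 h2 hb hr
    obtain ⟨c, hc, he⟩ := seedsB_covers h1 h2 hb hr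
    exact (foldInsert_mem _ _ p).mpr (Or.inr ⟨c, hc, he⟩)
  · intro p hp
    rcases (foldInsert_mem _ _ p).mp hp with h | ⟨c, hc, he⟩
    · exact absurd h (Finset.notMem_empty p)
    · exact Or.inl ⟨c, List.mem_reverse.mpr hc, he⟩

theorem cell_eq (x : List Int) (n : Nat) (i j : Nat) (hi : i < n) (hj : j < n) (t : Int) :
    (if x.getD (i * n + j) 0 ≠ 0 then
      if i = 0 ∨ j = 0 ∨ i = n - 1 ∨ j = n - 1 then t + 1
      else if (i - 1, j) ∈ loopB x n (seedsB x n).reverse ((seedsB x n).foldl (fun R c => insert c.val R) ∅) ∨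
              (i + 1, j) ∈ loopB x n (seedsB x n).reverse ((seedsB x n).foldl (fun R c => insert c.val R) ∅) ∨
              (i, j - 1) ∈ loopB x n (seedsB x n).reverse ((seedsB x n).foldl (fun R c => insert c.val R) ∅) ∨
              (i, j + 1) ∈ loopB x n (seedsB x n).reverse ((seedsB x n).foldl (fun R c => insert c.val R) ∅)
           then t + 1 else t
     else t)
    = t + (if (i, j) ∈ loopA x n (initA n).reverse ∅ ∅ then (1 : Int) else 0) := by
  have hA := evalA_char x n
  have hB := evalB_char x n
  by_cases hp : x.getD (i * n + j) 0 = 0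
  · rw [if_neg (by simpa using hp)]
    rw [if_neg (fun h => ((hA (i, j)).mp h).2.2.1 hp), add_zero]
  · rw [if_pos hp]
    by_cases hb : i = 0 ∨ j = 0 ∨ i = n - 1 ∨ j = n - 1
    · rw [if_pos hb, if_pos ((hA (i, j)).mpr ⟨hi, hj, hp, Vis.boundary (i, j) hi hj hb⟩)]
    · rw [if_neg hb]
      push_neg at hb
      obtain ⟨hb1, hb2, hb3, hb4⟩ := hb
      by_cases hn : (i - 1, j) ∈ loopB x n (seedsB x n).reverse ((seedsB x n).foldl (fun R c => insert c.val R) ∅) ∨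
              (i + 1, j) ∈ loopB x n (seedsB x n).reverse ((seedsB x n).foldl (fun R c => insert c.val R) ∅) ∨
              (i, j - 1) ∈ loopB x n (seedsB x n).reverse ((seedsB x n).foldl (fun R c => insert c.val R) ∅) ∨
              (i, j + 1) ∈ loopB x n (seedsB x n).reverse ((seedsB x n).foldl (fun R c => insert c.val R) ∅)
      · rw [if_pos hn]
        have hvis : Vis x n (i, j) := by
          rcases hn with h | h | h | h
          · obtain ⟨_, _, hr, hv⟩ := (hB _).mp h
            exact Vis.step _ _ hv hr hi hj (Or.inl ⟨by omega, rfl⟩)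
          · obtain ⟨_, _, hr, hv⟩ := (hB _).mp h
            exact Vis.step _ _ hv hr hi hj (Or.inr (Or.inl ⟨by omega, rfl⟩))
          · obtain ⟨_, _, hr, hv⟩ := (hB _).mp h
            exact Vis.step _ _ hv hr hi hj (Or.inr (Or.inr (Or.inl ⟨rfl, by omega⟩)))
          · obtain ⟨_, _, hr, hv⟩ := (hB _).mp h
            exact Vis.step _ _ hv hr hi hj (Or.inr (Or.inr (Or.inr ⟨rfl, by omega⟩)))
        rw [if_pos ((hA (i, j)).mpr ⟨hi, hj, hp, hvis⟩)]
      · rw [if_neg hn]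
        rw [if_neg, add_zero]
        intro h
        have hvis := ((hA (i, j)).mp h).2.2.2
        cases hvis with
        | boundary p h1 h2 hbb => exact absurd hbb (by simp only [Bdy]; push_neg; exact ⟨hb1, hb2, hb3, hb4⟩)
        | step p q hv hr h1 h2 ha =>
          have hmem : p ∈ loopB x n (seedsB x n).reverse ((seedsB x n).foldl (fun R c => insert c.val R) ∅) :=
            (hB p).mpr ⟨(Vis_lt hv).1, (Vis_lt hv).2, hr, hv⟩
          rcases ha with ⟨e1, e2⟩ | ⟨e1, e2⟩ | ⟨e1, e2⟩ | ⟨e1, e2⟩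
          · exact hn (Or.inl (by
              have : p = (i - 1, j) := Prod.ext_iff.mpr ⟨by omega, by omega⟩
              exact this ▸ hmem))
          · exact hn (Or.inr (Or.inl (by
              have : p = (i + 1, j) := Prod.ext_iff.mpr ⟨by omega, by omega⟩
              exact this ▸ hmem)))
          · exact hn (Or.inr (Or.inr (Or.inl (by
              have : p = (i, j - 1) := Prod.ext_iff.mpr ⟨by omega, by omega⟩
              exact this ▸ hmem))))
          · exact hn (Or.inr (Or.inr (Or.inr (by
              have : p = (i, j + 1) := Prod.ext_iff.mpr ⟨by omega, by omega⟩
              exact this ▸ hmem))))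

theorem evaluate_eq (x : List Int) : evaluate x = evaluate_alt x := by
  simp only [evaluate, evaluate_alt]
  refine (PySem.List.foldl_congr_mem _ _ _ _ ?_).symm
  intro s i hi
  have hi' : i < Nat.sqrt x.length := List.mem_range.mp hi
  rw [PySem.List.foldl_congr_mem _ _ _ _
      (fun t j hj => cell_eq x (Nat.sqrt x.length) i j hi' (List.mem_range.mp hj) t)]
  rw [PySem.List.foldl_add, PySem.List.foldl_add]
  omega

-- ===== VERDICT (by name: the statement is the Claim_ definition above) =====
theorem evaluate_spec : Claim_equal_evaluate := by
  intro x _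
  unfold Spec_evaluate
  exact evaluate_eq x
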